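-- pv_equiv track=rewrite | github.com/douglashardman/tradebot | testing/test_loss_limit.py | analyze_streaks
-- ===== SOURCE A (Python) =====
-- def analyze_streaks(results):
--     """Analyze winning and losing streaks."""
--     streaks = []
--     current_streak = 0
--     streak_type = None
--
--     for r in results:
--         pnl = r.get('pnl', 0)
--         if pnl > 0:
--             day_type = 'win'
--         elif pnl < 0:
--             day_type = 'loss'
--         else:
--             day_type = 'flat'
--             continue  # Skip flat days for streak counting
--
--         if streak_type == day_type:
--             current_streak += 1
--         else:
--             if streak_type is not None:
--                 streaks.append((streak_type, current_streak))
--             streak_type = day_type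
--             current_streak = 1
--
--     # Don't forget the last streak
--     if streak_type is not None:
--         streaks.append((streak_type, current_streak))
--
--     return streaks
-- ===== SOURCE B (Python) =====
-- def analyze_streaks(results):
--     """Analyze winning and losing streaks."""
--     signs = []
--     for r in results:
--         pnl = r.get('pnl', 0)
--         if pnl > 0:
--             signs.append('win')
--         elif pnl < 0:
--             signs.append('loss')
--         # flat days contribute nothing
--
--     def runs(ts):
--         # recursive head-run decomposition: peel the first run, recurse on the rest
--         if not ts:
--             return []
--         head = ts[0]
--         n = 1
--         while n < len(ts) and ts[n] == head:
--             n += 1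
--         return [(head, n)] + runs(ts[n:])
--
--     return runs(signs)
-- ===== Notes on version B (the rewrite author's own statement) =====
-- stated objective: alternative
-- what changed: Replaced A's single-pass streak_type/current_streak state machine with trailing flush by two stages: first classify every day into a flat-free sign list, then a recursive head-run decomposition that measures each run's length by scanning it and recurses on the remainder.
import Mathlib
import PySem

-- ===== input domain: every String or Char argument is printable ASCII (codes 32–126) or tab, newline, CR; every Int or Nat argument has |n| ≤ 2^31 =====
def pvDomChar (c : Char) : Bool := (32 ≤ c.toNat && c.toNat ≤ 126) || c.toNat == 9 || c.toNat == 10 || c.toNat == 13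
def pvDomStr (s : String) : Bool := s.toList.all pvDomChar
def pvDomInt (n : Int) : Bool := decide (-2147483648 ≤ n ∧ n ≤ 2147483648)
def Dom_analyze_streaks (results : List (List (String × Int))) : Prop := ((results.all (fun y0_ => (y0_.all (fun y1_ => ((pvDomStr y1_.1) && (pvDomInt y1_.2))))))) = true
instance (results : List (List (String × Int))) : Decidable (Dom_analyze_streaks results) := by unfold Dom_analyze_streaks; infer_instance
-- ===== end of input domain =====

-- B replaces A's single-pass streak state machine (with trailing flush) by two stages:
-- classify days into a flat-free sign list, then recursively peel off the leading run;
-- same return value, alternative decomposition (no speed claim).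


-- ===== PORT A =====
-- A's loop state: (streaks, current_streak, streak_type)
def analyze_streaks_step (s : List (String × Int) × Int × Option String) (day_type : String) :
    List (String × Int) × Int × Option String :=
  if s.2.2 = some day_type then (s.1, s.2.1 + 1, s.2.2)
  else
    match s.2.2 with
    | some t => (s.1 ++ [(t, s.2.1)], 1, some day_type)
    | none => (s.1, 1, some day_type)

def analyze_streaks (results : List (List (String × Int))) : List (String × Int) :=
  let st := results.foldl
    (fun s r =>
      let pnl := PySem.Dict.getD (PySem.Dict.mk r) "pnl" 0
      if pnl > 0 then analyze_streaks_step s "win"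
      else if pnl < 0 then analyze_streaks_step s "loss"
      else s)  -- 'flat': continue
    ([], 0, none)
  match st.2.2 with
  | some t => st.1 ++ [(t, st.2.1)]
  | none => st.1

-- ===== PORT B =====
-- stage 1: classify each day; flats contribute nothing to the sign list
def analyze_streaks_sign (r : List (String × Int)) : Option String :=
  let pnl := PySem.Dict.getD (PySem.Dict.mk r) "pnl" 0
  if pnl > 0 then some "win"
  else if pnl < 0 then some "loss"
  else none

-- stage 2: recursive head-run decomposition; the while-loop counting n
-- (n = 1 + length of the equal prefix of the tail) is takeWhile, ts[n:] is dropWhile.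
def analyze_streaks_runs : List String → List (String × Int)
  | [] => []
  | x :: xs =>
    (x, 1 + ((xs.takeWhile (· = x)).length : Int)) :: analyze_streaks_runs (xs.dropWhile (· = x))
termination_by l => l.length
decreasing_by
  simpa using Nat.lt_succ_of_le (List.length_dropWhile_le _ _)

def analyze_streaks_alt (results : List (List (String × Int))) : List (String × Int) :=
  analyze_streaks_runs ((results.map analyze_streaks_sign).filterMap id)

-- ===== PRECONDITION & SPEC =====
def Spec_analyze_streaks (results : List (List (String × Int))) (out : List (String × Int)) : Prop := out = analyze_streaks_alt results
instance (results : List (List (String × Int))) (out : List (String × Int)) : Decidable (Spec_analyze_streaks results out) := by unfold Spec_analyze_streaks; infer_instance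

-- ===== CLAIM (what is proved, stated in full; the proofs are below) =====
def Claim_equal_analyze_streaks : Prop := ∀ (results : List (List (String × Int))), Dom_analyze_streaks results → Spec_analyze_streaks results (analyze_streaks results)

-- ===== LEMMAS AND PROOFS =====

-- finish A's state: append the pending streak, if any
def asFlush (s : List (String × Int) × Int × Option String) : List (String × Int) :=
  match s.2.2 with
  | some t => s.1 ++ [(t, s.2.1)]
  | none => s.1

-- the pending run (t, cur) merged with the run decomposition of ts
def asRunsFrom (t : String) (cur : Int) (ts : List String) : List (String × Int) :=
  (t, cur + ((ts.takeWhile (· = t)).length : Int)) :: analyze_streaks_runs (ts.dropWhile (· = t))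

theorem runs_cons (x : String) (xs : List String) :
    analyze_streaks_runs (x :: xs) = asRunsFrom x 1 xs := by
  rw [analyze_streaks_runs, asRunsFrom]

-- A's loop over results equals A's step folded over the classified, flat-free list
theorem foldA_eq_foldT (results : List (List (String × Int)))
    (s : List (String × Int) × Int × Option String) :
    results.foldl
      (fun s r =>
        let pnl := PySem.Dict.getD (PySem.Dict.mk r) "pnl" 0
        if pnl > 0 then analyze_streaks_step s "win"
        else if pnl < 0 then analyze_streaks_step s "loss"
        else s) s
    = ((results.map analyze_streaks_sign).filterMap id).foldl analyze_streaks_step s := by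
  induction results generalizing s with
  | nil => rfl
  | cons r rest ih =>
    simp only [List.foldl_cons, List.map_cons]
    by_cases h1 : PySem.Dict.getD (PySem.Dict.mk r) "pnl" 0 > 0
    · have hs : analyze_streaks_sign r = some "win" := by simp [analyze_streaks_sign, h1]
      rw [hs]
      simp only [List.filterMap_cons, id, List.foldl_cons]
      rw [if_pos h1]
      exact ih _
    · by_cases h2 : PySem.Dict.getD (PySem.Dict.mk r) "pnl" 0 < 0
      · have hs : analyze_streaks_sign r = some "loss" := by simp [analyze_streaks_sign, h1, h2]
        rw [hs]
        simp only [List.filterMap_cons, id, List.foldl_cons]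
        rw [if_neg h1, if_pos h2]
        exact ih _
      · have hs : analyze_streaks_sign r = none := by simp [analyze_streaks_sign, h1, h2]
        rw [hs]
        simp only [List.filterMap_cons, id]
        rw [if_neg h1, if_neg h2]
        exact ih _

-- folding A's step from a pending state computes the run decomposition with that run merged in front
theorem foldT_some (ts : List String) (acc : List (String × Int)) (cur : Int) (t : String) :
    asFlush (ts.foldl analyze_streaks_step (acc, cur, some t)) = acc ++ asRunsFrom t cur ts := by
  induction ts generalizing acc cur t with
  | nil => simp [asFlush, asRunsFrom, analyze_streaks_runs]
  | cons h rest ih =>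
    by_cases he : t = h
    · subst he
      have : analyze_streaks_step (acc, cur, some t) t = (acc, cur + 1, some t) := by
        simp [analyze_streaks_step]
      rw [List.foldl_cons, this, ih]
      simp only [asRunsFrom, List.takeWhile_cons, List.dropWhile_cons]
      simp
      ring
    · have : analyze_streaks_step (acc, cur, some t) h = (acc ++ [(t, cur)], 1, some h) := by
        simp [analyze_streaks_step, he]
      rw [List.foldl_cons, this, ih]
      have hne : ¬ (h = t) := fun hh => he hh.symm
      simp only [asRunsFrom, List.takeWhile_cons, List.dropWhile_cons, hne]
      simp [runs_cons, asRunsFrom]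

theorem foldT_none (ts : List String) :
    asFlush (ts.foldl analyze_streaks_step ([], 0, none)) = analyze_streaks_runs ts := by
  cases ts with
  | nil => simp [asFlush, analyze_streaks_runs]
  | cons h rest =>
    have : analyze_streaks_step ([], 0, none) h = ([], 1, some h) := by
      simp [analyze_streaks_step]
    rw [List.foldl_cons, this, foldT_some, runs_cons]
    simp

-- ===== VERDICT (by name: the statement is the Claim_ definition above) =====
theorem analyze_streaks_spec : Claim_equal_analyze_streaks := by
  intro results _
  show analyze_streaks results = analyze_streaks_alt results
  unfold analyze_streaks analyze_streaks_alt
  rw [foldA_eq_foldT]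
  exact foldT_none _
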